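-- pv_equiv track=rewrite | github.com/Dascent/vault | core-skills/healer/healer_plus_plus/starter.py | _count_repetition
-- ===== SOURCE A (Python) =====
-- from typing import Any, Dict, List, Optional
--
-- def _count_repetition(outputs: List[str]) -> int:
--     counts = {}
--     for o in outputs:
--         toks = o.split()
--         for t in toks:
--             counts[t] = counts.get(t, 0) + 1
--     # simple heuristic: count tokens that appear more than once
--     repeats = sum(1 for c in counts.values() if c > 1)
--     return repeats
-- ===== SOURCE B (Python) =====
-- from typing import List
--
-- def _count_repetition(outputs: List[str]) -> int:
--     toks = sorted(t for o in outputs for t in o.split())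
--     n = len(toks)
--     reps = 0
--     i = 0
--     while i < n:
--         j = i + 1
--         while j < n and toks[j] == toks[i]:
--             j += 1
--         if j - i >= 2:
--             reps += 1
--         i = j
--     return reps
-- ===== Notes on version B (the rewrite author's own statement) =====
-- stated objective: alternative
-- what changed: Replaces the frequency dict and its values>1 scan with sort-then-scan: the flattened token list is sorted and one run-length pass counts runs of length at least 2, so no counts are ever stored.
import Mathlib
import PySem

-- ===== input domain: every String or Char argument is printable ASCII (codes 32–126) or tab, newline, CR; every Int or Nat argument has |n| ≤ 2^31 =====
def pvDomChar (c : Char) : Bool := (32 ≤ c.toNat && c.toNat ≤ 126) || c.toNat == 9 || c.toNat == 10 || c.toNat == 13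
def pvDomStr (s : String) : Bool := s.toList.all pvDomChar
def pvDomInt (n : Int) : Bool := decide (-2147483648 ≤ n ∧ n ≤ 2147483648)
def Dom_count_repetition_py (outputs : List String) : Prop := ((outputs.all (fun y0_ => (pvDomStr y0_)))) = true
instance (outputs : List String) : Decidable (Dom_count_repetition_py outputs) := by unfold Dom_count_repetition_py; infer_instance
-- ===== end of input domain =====

-- B replaces the frequency dict + values>1 scan by sort-then-scan: sort the flattened
-- token list and count runs of length ≥ 2 with a recursive run-length pass (alternative algorithm).

-- ===== PORT A =====
def count_repetition_py (outputs : List String) : Int :=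
  let counts : PySem.Dict String Int :=
    outputs.foldl (fun counts o =>
      (PySem.Str.split₀ o).foldl (fun counts t => counts.insert t (counts.getD t 0 + 1)) counts)
      PySem.Dict.empty
  ((counts.values.filter (fun c => 1 < c)).length : Int)

-- ===== PORT B =====
-- The outer while loop advances i run by run over the sorted list; each iteration is one
-- step of this recursion on the remaining suffix: the inner while loop scanning equal tokens
-- is the takeWhile/dropWhile split of the tail, and j - i ≥ 2 ↔ that run of the tail is nonempty.
def pvCountRuns : List String → Int
  | [] => 0
  | h :: rest =>
    (if (rest.takeWhile (· == h)) ≠ [] then (1 : Int) else 0) +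
      pvCountRuns (rest.dropWhile (· == h))
termination_by xs => xs.length
decreasing_by
  simp only [List.length_cons]
  exact Nat.lt_succ_of_le (List.Sublist.length_le (List.dropWhile_sublist _))

def count_repetition_py_alt (outputs : List String) : Int :=
  pvCountRuns (PySem.List.sorted (outputs.flatMap PySem.Str.split₀) (fun x => x) false)

-- ===== PRECONDITION & SPEC =====
def Spec_count_repetition_py (outputs : List String) (out : Int) : Prop := out = count_repetition_py_alt outputs
instance (outputs : List String) (out : Int) : Decidable (Spec_count_repetition_py outputs out) := by unfold Spec_count_repetition_py; infer_instance

-- ===== CLAIM (what is proved, stated in full; the proofs are below) =====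
def Claim_equal_count_repetition_py : Prop := ∀ (outputs : List String), Dom_count_repetition_py outputs → Spec_count_repetition_py outputs (count_repetition_py outputs)

-- ===== LEMMAS AND PROOFS =====

-- Both nested loops are the corresponding single loop over the flattened token list.
theorem foldl_flatMap {α β γ : Type} (g : β → γ → β) (f : α → List γ) (l : List α) (init : β) :
    l.foldl (fun acc o => (f o).foldl g acc) init = (l.flatMap f).foldl g init := by
  induction l generalizing init with
  | nil => rfl
  | cons x xs ih => simp [List.flatMap_cons, List.foldl_append, ih]

def pvToks (outputs : List String) : List String := outputs.flatMap PySem.Str.split₀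

-- A's result = number of distinct tokens whose count in the flattened token list is ≥ 2.
def pvRepCount (l : List String) : Int :=
  (((PySem.Set.ofList l).filter (fun x => decide (2 ≤ l.count x))).length : Int)

theorem portA_flat (outputs : List String) :
    count_repetition_py outputs =
      ((((PySem.Dict.counter (pvToks outputs)).values).filter (fun c => 1 < c)).length : Int) := by
  unfold count_repetition_py pvToks
  rw [foldl_flatMap, PySem.Dict.foldl_insert_getD_add_one_eq_counter]

theorem portA_repCount (outputs : List String) :
    count_repetition_py outputs = pvRepCount (pvToks outputs) := by
  rw [portA_flat]
  unfold pvRepCount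
  set toks := pvToks outputs
  have hvals : (PySem.Dict.counter toks : PySem.Dict String Int).values =
      (PySem.Set.ofList toks).map (fun k => (toks.count k : Int)) := by
    show ((PySem.Dict.counter toks : PySem.Dict String Int).items.map (·.2)) = _
    rw [PySem.Dict.items_counter]
    simp
  rw [hvals, List.filter_map, List.length_map]
  congr 2
  apply List.filter_congr
  intro x _
  simp only [Function.comp_apply, decide_eq_decide]
  omega

-- pvRepCount is invariant under permutation (count and distinct-membership are).
theorem pvRepCount_perm (l l' : List String) (hp : l.Perm l') : pvRepCount l = pvRepCount l' := by
  unfold pvRepCount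
  have hpr : ((PySem.Set.ofList l).filter (fun x => decide (2 ≤ l.count x))).Perm
      ((PySem.Set.ofList l').filter (fun x => decide (2 ≤ l'.count x))) := by
    apply (List.perm_ext_iff_of_nodup
      (List.Nodup.filter _ (PySem.Set.nodup_ofList l))
      (List.Nodup.filter _ (PySem.Set.nodup_ofList l'))).2
    intro x
    simp only [List.mem_filter, decide_eq_true_eq, PySem.Set.mem_ofList]
    rw [hp.mem_iff, hp.count_eq]
  rw [hpr.length_eq]

-- In a sorted tail `rest` lying entirely above `h`, dropping the leading h's removes every h.
theorem not_mem_dropWhile_sorted (h : String) (rest : List String)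
    (hp : rest.Pairwise (· ≤ ·)) (hle : ∀ x ∈ rest, h ≤ x) :
    h ∉ rest.dropWhile (· == h) := by
  induction rest with
  | nil => simp
  | cons a as ih =>
    by_cases ha : (a == h) = true
    · rw [List.dropWhile_cons, if_pos ha]
      exact ih (List.pairwise_cons.1 hp).2 (fun x hx => hle x (List.mem_cons_of_mem a hx))
    · rw [List.dropWhile_cons, if_neg ha]
      have hane : a ≠ h := by simpa using ha
      have hlt : h < a := lt_of_le_of_ne (hle a (List.mem_cons_self)) (Ne.symm hane)
      intro hmem
      rcases List.mem_cons.1 hmem with rfl | hmem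
      · exact hane rfl
      · exact absurd ((List.pairwise_cons.1 hp).1 h hmem) (not_le.2 hlt)

-- On a sorted list, pvRepCount is computed by the run-length scan.
theorem pvCountRuns_eq_repCount (s : List String) (hs : s.Pairwise (· ≤ ·)) :
    pvCountRuns s = pvRepCount s := by
  induction hn : s.length using Nat.strong_induction_on generalizing s with
  | _ n ih =>
  match s, hs with
  | [], _ => rw [pvCountRuns.eq_1]; simp [pvRepCount, PySem.Set.ofList]
  | h :: rest, hs =>
    subst hn
    set run := rest.takeWhile (· == h) with hrun
    set rest' := rest.dropWhile (· == h) with hrest'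
    have hsplit : rest = run ++ rest' := (List.takeWhile_append_dropWhile).symm
    have hrunall : ∀ x ∈ run, x = h := by
      intro x hx
      have := List.mem_takeWhile_imp hx
      simpa using this
    have hpw_rest : rest.Pairwise (· ≤ ·) := (List.pairwise_cons.1 hs).2
    have hle_rest : ∀ x ∈ rest, h ≤ x := (List.pairwise_cons.1 hs).1
    have hpw' : rest'.Pairwise (· ≤ ·) := hpw_rest.sublist (List.dropWhile_sublist _)
    have hnotmem : h ∉ rest' := not_mem_dropWhile_sorted h rest hpw_rest hle_rest
    have hcount_h : (h :: rest).count h = run.length + 1 := by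
      rw [List.count_cons_self, hsplit, List.count_append]
      have h1 : run.count h = run.length := by
        rw [List.count_eq_length]
        intro x hx; exact ((hrunall x hx) ▸ rfl)
      have h2 : rest'.count h = 0 := List.count_eq_zero_of_not_mem hnotmem
      omega
    have hcount_ne : ∀ x, x ≠ h → (h :: rest).count x = rest'.count x := by
      intro x hx
      rw [hsplit]
      have hz : run.count x = 0 :=
        List.count_eq_zero_of_not_mem (fun hm => hx (hrunall x hm))
      simp [List.count_append, hz, Ne.symm hx]
    -- distinct elements of h :: rest are h plus those of rest'
    have hofl : ((PySem.Set.ofList (h :: rest)) : List String).Perm (h :: PySem.Set.ofList rest') := by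
      apply (List.perm_ext_iff_of_nodup (PySem.Set.nodup_ofList _)
        (by
          refine List.nodup_cons.2 ⟨?_, PySem.Set.nodup_ofList _⟩
          rw [PySem.Set.mem_ofList]; exact hnotmem)).2
      intro x
      rw [PySem.Set.mem_ofList, List.mem_cons, List.mem_cons, PySem.Set.mem_ofList]
      constructor
      · rintro (rfl | hx)
        · exact Or.inl rfl
        · rw [hsplit, List.mem_append] at hx
          rcases hx with hx | hx
          · exact Or.inl (hrunall x hx)
          · exact Or.inr hx
      · rintro (rfl | hx)
        · exact Or.inl rfl
        · exact Or.inr (by rw [hsplit, List.mem_append]; exact Or.inr hx)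
    have hfilter_perm :
        ((PySem.Set.ofList (h :: rest)).filter (fun x => decide (2 ≤ (h :: rest).count x))).Perm
          ((h :: PySem.Set.ofList rest').filter (fun x => decide (2 ≤ (h :: rest).count x))) :=
      hofl.filter _
    have htail : ((PySem.Set.ofList rest').filter (fun x => decide (2 ≤ (h :: rest).count x)))
        = ((PySem.Set.ofList rest').filter (fun x => decide (2 ≤ rest'.count x))) := by
      apply List.filter_congr
      intro x hx
      have hxne : x ≠ h := by
        rw [PySem.Set.mem_ofList] at hx
        intro heq; exact hnotmem (heq ▸ hx)
      rw [hcount_ne x hxne]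
    have hrep : pvRepCount (h :: rest) =
        (if run ≠ [] then (1 : Int) else 0) + pvRepCount rest' := by
      unfold pvRepCount
      rw [hfilter_perm.length_eq, List.filter_cons, htail]
      by_cases hr : run = []
      · have hno : ¬ (2 ≤ (h :: rest).count h) := by rw [hcount_h, hr]; simp
        simp only [hr]
        rw [if_neg (by simpa using hno)]
        simp
      · have hlen : 0 < run.length := List.length_pos_of_ne_nil hr
        have hyes : (2 ≤ (h :: rest).count h) := by rw [hcount_h]; omega
        rw [if_pos (by simpa using hyes), if_pos hr]
        simp only [List.length_cons]
        push_cast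
        ring
    rw [hrep]
    have hlt : rest'.length < (h :: rest).length := by
      simp only [List.length_cons]
      exact Nat.lt_succ_of_le (List.Sublist.length_le (List.dropWhile_sublist _))
    rw [pvCountRuns.eq_2, ← ih rest'.length hlt rest' hpw' rfl]

-- ===== VERDICT (by name: the statement is the Claim_ definition above) =====
theorem count_repetition_py_spec : Claim_equal_count_repetition_py := by
  unfold Claim_equal_count_repetition_py
  intro outputs _
  unfold Spec_count_repetition_py
  rw [portA_repCount]
  unfold count_repetition_py_alt
  rw [show outputs.flatMap PySem.Str.split₀ = pvToks outputs from rfl]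
  rw [pvCountRuns_eq_repCount _ (by simpa using PySem.List.sorted_pairwise (pvToks outputs) (fun x => x))]
  exact pvRepCount_perm _ _ (PySem.List.sorted_perm (pvToks outputs) (fun x => x) false).symm
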